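-- pv_equiv track=rewrite | github.com/MarkAStevens04/Duty_Solver | main.py | de_order_days
-- ===== SOURCE A (Python) =====
-- def de_order_days(finished_availability, day_mapping):
--     # takes the day_mapping and returns the days to their original order
--     final_availability = []
--     for p in range(len(finished_availability)):
--         final_availability.append([0] * len(finished_availability[0]))
--
--     for d in range(len(finished_availability[0])):
--         orig_index = day_mapping[d]
--         for p in range(len(finished_availability)):
--             final_availability[p][orig_index] = finished_availability[p][d]
--
--     return final_availability
-- ===== SOURCE B (Python) =====
-- def de_order_days(finished_availability, day_mapping):
--     # column-oriented: transpose, permute whole columns, transpose back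
--     width = len(finished_availability[0])
--     height = len(finished_availability)
--     cols = [tuple(row[d] for row in finished_availability) for d in range(width)]
--     new_cols = [(0,) * height] * width
--     for d in range(width):
--         new_cols[day_mapping[d]] = cols[d]
--     return [[col[p] for col in new_cols] for p in range(height)]
-- ===== Notes on version B (the rewrite author's own statement) =====
-- stated objective: alternative
-- what changed: B transposes the matrix into a list of whole columns, places each column at its mapped position in one assignment, and transposes back, instead of A's preallocated rows with per-element nested index writes.
import Mathlib
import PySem

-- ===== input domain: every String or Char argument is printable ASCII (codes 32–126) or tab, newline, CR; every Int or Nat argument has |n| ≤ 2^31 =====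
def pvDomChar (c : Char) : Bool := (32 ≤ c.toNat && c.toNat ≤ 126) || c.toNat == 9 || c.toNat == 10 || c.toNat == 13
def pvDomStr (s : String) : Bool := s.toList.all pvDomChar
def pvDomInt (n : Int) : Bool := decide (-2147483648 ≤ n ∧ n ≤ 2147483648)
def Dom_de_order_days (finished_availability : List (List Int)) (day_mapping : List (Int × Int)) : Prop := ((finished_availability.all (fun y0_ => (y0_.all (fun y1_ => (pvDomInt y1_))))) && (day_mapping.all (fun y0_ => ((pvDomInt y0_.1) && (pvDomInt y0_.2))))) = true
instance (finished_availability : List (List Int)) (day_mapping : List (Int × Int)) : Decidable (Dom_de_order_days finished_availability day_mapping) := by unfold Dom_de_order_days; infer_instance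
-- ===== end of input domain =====

-- B reorders whole columns at once (transpose → permute columns → transpose back) instead of
-- A's per-element nested index writes; objective: alternative (same asymptotic cost).

-- ===== PORT A =====
-- literal transliteration of A: preallocate h rows of [0]*w, then for each d
-- write column day_mapping[d] element by element.
def de_order_days (finished_availability : List (List Int)) (day_mapping : List (Int × Int)) : List (List Int) :=
  let w := (finished_availability.headD []).length
  let h := finished_availability.length
  let init := (List.range h).foldl (fun acc _p => acc ++ [List.replicate w (0 : Int)]) []
  (List.range w).foldl (fun M (d : Nat) =>
    let orig := (PySem.Dict.mk day_mapping).getD (d : Int) 0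
    (List.range h).foldl (fun M' (p : Nat) =>
      PySem.List.pySetD M' (p : Int)
        (PySem.List.pySetD (M'.getD p []) orig
          (PySem.List.pyGetD (finished_availability.getD p []) (d : Int) 0))) M) init

-- ===== PORT B =====
-- literal transliteration of B (Source B): build the list of columns, place whole
-- columns into new_cols at day_mapping[d], read the rows back off new_cols.
def de_order_days_alt (finished_availability : List (List Int)) (day_mapping : List (Int × Int)) : List (List Int) :=
  let w := (finished_availability.headD []).length
  let h := finished_availability.length
  let cols := (List.range w).map (fun (d : Nat) =>
    finished_availability.map (fun row => PySem.List.pyGetD row (d : Int) 0))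
  let newCols := (List.range w).foldl (fun nc (d : Nat) =>
    PySem.List.pySetD nc ((PySem.Dict.mk day_mapping).getD (d : Int) 0) (cols.getD d [])) (List.replicate w (List.replicate h (0 : Int)))
  (List.range h).map (fun p => newCols.map (fun col => col.getD p (0 : Int)))

-- ===== PRECONDITION & SPEC =====
-- Pre_ is exactly where the Python A returns: a nonempty matrix (A indexes row 0), every row at
-- least as long as row 0 (A reads fa[p][d] for d < len(row 0)), and for each such d the mapping
-- has key d with a value usable as an index into a length-w row (Python's negative wrap allowed).
def Pre_de_order_days (finished_availability : List (List Int)) (day_mapping : List (Int × Int)) : Prop :=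
  finished_availability ≠ [] ∧
  (∀ row ∈ finished_availability, (finished_availability.headD []).length ≤ row.length) ∧
  (∀ d ∈ List.range (finished_availability.headD []).length,
    ((PySem.Dict.mk day_mapping).get? (d : Int)).any
      (fun o => decide (PySem.Raise.InRange (finished_availability.headD []).length o)) = true)
instance (finished_availability : List (List Int)) (day_mapping : List (Int × Int)) : Decidable (Pre_de_order_days finished_availability day_mapping) := by unfold Pre_de_order_days; infer_instance

def pvWitness_de_order_days : List (List Int) × (List (Int × Int)) := ([[1, 2], [3, 4]], [(0, 1), (1, 0)])

def Spec_de_order_days (finished_availability : List (List Int)) (day_mapping : List (Int × Int)) (out : List (List Int)) : Prop := out = de_order_days_alt finished_availability day_mapping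
instance (finished_availability : List (List Int)) (day_mapping : List (Int × Int)) (out : List (List Int)) : Decidable (Spec_de_order_days finished_availability day_mapping out) := by unfold Spec_de_order_days; infer_instance

-- ===== CLAIM (what is proved, stated in full; the proofs are below) =====
def Claim_equal_de_order_days : Prop := ∀ (finished_availability : List (List Int)) (day_mapping : List (Int × Int)), Dom_de_order_days finished_availability day_mapping → Pre_de_order_days finished_availability day_mapping → Spec_de_order_days finished_availability day_mapping (de_order_days finished_availability day_mapping)

-- ===== LEMMAS AND PROOFS =====

-- the Nat index Python's negative-wrapping list assignment actually writes to
def pvWrap (w : Nat) (o : Int) : Nat := if o < 0 then (o + w).toNat else o.toNat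

theorem pvWrap_lt {w : Nat} {o : Int} (h : PySem.Raise.InRange w o) : pvWrap w o < w := by
  rcases h with ⟨h1, h2⟩; unfold pvWrap; split <;> omega

theorem pySetD_eq_set_wrap {α : Type} {xs : List α} {w : Nat} {o : Int} (hl : xs.length = w)
    (h : PySem.Raise.InRange w o) (v : α) :
    PySem.List.pySetD xs o v = xs.set (pvWrap w o) v := by
  rcases h with ⟨h1, h2⟩
  simp only [PySem.List.pySetD, PySem.List.pySet?, PySem.List.pyIdx?, hl, pvWrap]
  split_ifs <;> simp <;> congr 1 <;> omega

theorem getD_set_eq {α : Type} [Inhabited α] (xs : List α) (n m : Nat) (v d : α) :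
    (xs.set n v).getD m d = if m = n ∧ n < xs.length then v else xs.getD m d := by
  simp only [List.getD, List.getElem?_set]
  split_ifs with h1 h2 h3 <;> simp_all

theorem foldl_append_const (n : Nat) (c : List Int) :
    (List.range n).foldl (fun acc _ => acc ++ [c]) [] = List.replicate n c := by
  induction n with
  | zero => simp
  | succ k ih => simp [List.range_succ, ih, List.replicate_succ']

-- A's inner loop over p writes each row once, in order: it is mapIdx
theorem inner_fold_eq_mapIdx (g : Nat → List Int → List Int) :
    ∀ (M pre : List (List Int)),
    (List.range' pre.length M.length).foldl
        (fun M' p => (M'.set p (g p (M'.getD p [])))) (pre ++ M)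
      = pre ++ M.mapIdx (fun i row => g (pre.length + i) row) := by
  intro M
  induction M with
  | nil => intro pre; simp
  | cons r M ih =>
    intro pre
    simp only [List.length_cons, List.range'_succ, List.foldl_cons]
    have hget : (pre ++ r :: M).getD pre.length [] = r := by
      simp [List.getD]
    have hset : (pre ++ r :: M).set pre.length (g pre.length ((pre ++ r :: M).getD pre.length [])) = (pre ++ [g pre.length r]) ++ M := by
      rw [hget]
      rw [show pre ++ r :: M = (pre ++ [r]) ++ M by simp]
      rw [List.set_append]
      simp
    rw [hset]
    have := ih (pre ++ [g pre.length r])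
    simp only [List.length_append, List.length_cons, List.length_nil, Nat.zero_add] at this ⊢
    rw [this]
    simp only [List.mapIdx_cons, List.append_assoc, List.singleton_append]
    congr 2
    congr 1
    funext i row
    congr 1
    omega

theorem inner_fold_eq_mapIdx' (g : Nat → List Int → List Int) (M : List (List Int)) :
    (List.range M.length).foldl (fun M' p => (M'.set p (g p (M'.getD p [])))) M
      = M.mapIdx (fun i row => g i row) := by
  have := inner_fold_eq_mapIdx g M []
  simpa [List.range_eq_range'] using this

theorem getD_mapIdx {l : List (List Int)} {f : Nat → List Int → List Int} {p : Nat}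
    (hp : p < l.length) : (l.mapIdx f).getD p [] = f p (l.getD p []) := by
  rw [List.getD_eq_getElem _ _ (by simpa using hp), List.getD_eq_getElem _ _ hp,
    List.getElem_mapIdx]

-- shapes + transpose relation preserved by the paired folds
theorem main_invariant (w h : Nat) (o : Nat → Int) (v : Nat → Nat → Int) :
    ∀ (ds : List Nat) (M NC : List (List Int)),
    (∀ d ∈ ds, PySem.Raise.InRange w (o d)) →
    M.length = h → (∀ p, p < h → (M.getD p []).length = w) →
    NC.length = w → (∀ q, q < w → (NC.getD q []).length = h) →
    (∀ p, p < h → ∀ q, q < w → (M.getD p []).getD q 0 = (NC.getD q []).getD p 0) →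
    (let M' := ds.foldl (fun M d => (List.range h).foldl (fun M'' (p : Nat) =>
        PySem.List.pySetD M'' (p : Int)
          (PySem.List.pySetD (M''.getD p []) (o d) (v p d))) M) M
     let NC' := ds.foldl (fun nc d => PySem.List.pySetD nc (o d) ((List.range h).map (fun p => v p d))) NC
     M'.length = h ∧ (∀ p, p < h → (M'.getD p []).length = w) ∧
     NC'.length = w ∧ (∀ q, q < w → (NC'.getD q []).length = h) ∧
     (∀ p, p < h → ∀ q, q < w → (M'.getD p []).getD q 0 = (NC'.getD q []).getD p 0)) := by
  intro ds
  induction ds with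
  | nil => intro M NC _ h1 h2 h3 h4 h5; exact ⟨h1, h2, h3, h4, h5⟩
  | cons d ds ih =>
    intro M NC hds h1 h2 h3 h4 h5
    have hd : PySem.Raise.InRange w (o d) := hds d (by simp)
    have htw : pvWrap w (o d) < w := pvWrap_lt hd
    simp only [List.foldl_cons]
    have hA : (List.range h).foldl (fun M'' (p : Nat) =>
        PySem.List.pySetD M'' (p : Int)
          (PySem.List.pySetD (M''.getD p []) (o d) (v p d))) M
        = M.mapIdx (fun p row => PySem.List.pySetD row (o d) (v p d)) := by
      have hi := inner_fold_eq_mapIdx' (fun p row => PySem.List.pySetD row (o d) (v p d)) M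
      rw [h1] at hi
      rw [← hi]
      apply PySem.List.foldl_congr_mem
      intro acc p _
      rw [PySem.List.pySetD_natCast]
    have hB : PySem.List.pySetD NC (o d) ((List.range h).map (fun p => v p d))
        = NC.set (pvWrap w (o d)) ((List.range h).map (fun p => v p d)) :=
      pySetD_eq_set_wrap h3 hd _
    rw [hA, hB]
    apply ih
    · intro d' hd'; exact hds d' (by simp [hd'])
    · simp [h1]
    · intro p hp
      rw [getD_mapIdx (by omega : p < M.length)]
      rw [pySetD_eq_set_wrap (h2 p hp) hd]
      rw [List.length_set]
      exact h2 p hp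
    · simp [h3]
    · intro q hq
      rw [getD_set_eq]
      split_ifs with hc
      · simp
      · exact h4 q hq
    · intro p hp q hq
      rw [getD_mapIdx (by omega : p < M.length), pySetD_eq_set_wrap (h2 p hp) hd,
        getD_set_eq, getD_set_eq]
      rw [h2 p hp, h3]
      split_ifs with hc
      · rw [PySem.List.getD_map_range _ _ _ _ hp]
      · exact h5 p hp q hq



theorem map_eq_range_map (l : List (List Int)) (f : List Int → Int) :
    l.map f = (List.range l.length).map (fun p => f (l.getD p [])) := by
  apply List.ext_getElem
  · simp
  · intro i h1 h2
    simp only [List.getElem_map, List.getElem_range]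
    rw [List.getD_eq_getElem _ _ (by simpa using h1)]

-- ===== VERDICT (by name: the statement is the Claim_ definition above) =====
theorem de_order_days_spec : Claim_equal_de_order_days := by
  intro fa dm _ hpre
  obtain ⟨hne, hrows, hdm⟩ := hpre
  unfold Spec_de_order_days de_order_days de_order_days_alt
  simp only [foldl_append_const]
  set w := (fa.headD []).length with hw
  set h := fa.length with hh
  set o : Nat → Int := fun d => (PySem.Dict.mk dm).getD (d : Int) 0 with ho
  set v : Nat → Nat → Int := fun p d => PySem.List.pyGetD (fa.getD p []) (d : Int) 0 with hv
  have hoIn : ∀ d ∈ List.range w, PySem.Raise.InRange w (o d) := by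
    intro d hdmem
    have hx := hdm d hdmem
    cases hg : (PySem.Dict.mk dm).get? (d : Int) with
    | none => rw [hg] at hx; simp [Option.any] at hx
    | some x =>
      rw [hg] at hx
      simp only [Option.any, decide_eq_true_eq] at hx
      rw [ho]
      simp only [PySem.Dict.getD_eq_get?_getD, hg, Option.getD_some]
      exact hx
  have key := main_invariant w h o v (List.range w)
      (List.replicate h (List.replicate w 0)) (List.replicate w (List.replicate h 0))
      hoIn (by simp)
      (by intro p hp
          rw [List.getD_eq_getElem (List.replicate h (List.replicate w (0:Int))) [] (by simpa using hp)]
          simp)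
      (by simp)
      (by intro q hq
          rw [List.getD_eq_getElem (List.replicate w (List.replicate h (0:Int))) [] (by simpa using hq)]
          simp)
      (by intro p hp q hq
          rw [List.getD_eq_getElem (List.replicate h (List.replicate w (0:Int))) [] (by simpa using hp),
            List.getD_eq_getElem (List.replicate w (List.replicate h (0:Int))) [] (by simpa using hq)]
          simp only [List.getElem_replicate]
          rw [List.getD_eq_getElem (List.replicate w (0:Int)) 0 (by simpa using hq),
            List.getD_eq_getElem (List.replicate h (0:Int)) 0 (by simpa using hp)]
          simp)
  obtain ⟨k1, k2, k3, k4, k5⟩ := key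
  simp only [ho, hv] at k1 k2 k3 k4 k5
  have hcols : (List.range w).foldl (fun nc (d : Nat) =>
        PySem.List.pySetD nc ((PySem.Dict.mk dm).getD (d : Int) 0)
          ((List.map (fun (d : Nat) => List.map (fun row => PySem.List.pyGetD row (d : Int) 0) fa) (List.range w)).getD d []))
        (List.replicate w (List.replicate h 0))
      = (List.range w).foldl (fun nc (d : Nat) =>
        PySem.List.pySetD nc ((PySem.Dict.mk dm).getD (d : Int) 0)
          (List.map (fun p => PySem.List.pyGetD (fa.getD p []) (d : Int) 0) (List.range h)))
        (List.replicate w (List.replicate h 0)) := by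
    apply PySem.List.foldl_congr_mem
    intro acc d hd
    have hdw : d < w := by simpa using hd
    rw [PySem.List.getD_map_range _ _ _ _ hdw]
    congr 1
    have := map_eq_range_map fa (fun row => PySem.List.pyGetD row (d : Int) 0)
    simpa using this
  rw [hcols]
  set MA := (List.range w).foldl (fun M (d : Nat) =>
      (List.range h).foldl (fun M' (p : Nat) =>
        PySem.List.pySetD M' (p : Int)
          (PySem.List.pySetD (M'.getD p []) ((PySem.Dict.mk dm).getD (d : Int) 0)
            (PySem.List.pyGetD (fa.getD p []) (d : Int) 0))) M)
      (List.replicate h (List.replicate w 0)) with hMA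
  set NCF := (List.range w).foldl (fun nc (d : Nat) =>
      PySem.List.pySetD nc ((PySem.Dict.mk dm).getD (d : Int) 0)
        (List.map (fun p => PySem.List.pyGetD (fa.getD p []) (d : Int) 0) (List.range h)))
      (List.replicate w (List.replicate h 0)) with hNCF
  apply List.ext_getElem
  · rw [k1]; simp
  · intro p hp1 hp2
    have hp : p < h := by rwa [k1] at hp1
    simp only [List.getElem_map, List.getElem_range]
    apply List.ext_getElem
    · rw [← List.getD_eq_getElem MA [] hp1, k2 p hp, List.length_map, k3]
    · intro q hq1 hq2
      have hq : q < w := by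
        rw [← List.getD_eq_getElem MA [] hp1, k2 p hp] at hq1; exact hq1
      have hqn : q < NCF.length := by rw [k3]; exact hq
      simp only [List.getElem_map]
      have e1 := k5 p hp q hq
      rw [List.getD_eq_getElem MA [] hp1, List.getD_eq_getElem NCF [] hqn,
        List.getD_eq_getElem MA[p] 0 hq1] at e1
      exact e1
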